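-- pv_equiv track=rewrite | github.com/dstrohl/AdvancedLogger | src/advanced_logger/helpers.py | deslugify
-- ===== SOURCE A (Python) =====
-- def deslugify(text, delim='_-.', case='title'):
--     """
--     generates a title or proper case text string.
--     :param text:
--     :param delim: a string used to delimit words
--     :param case: ['lower'/'upper'/'title'/'sentence']
--     """
--     for char in delim:
--         text = text.replace(char, ' ')
--     if case == 'title':
--         text = text.title()
--     elif case == 'lower':
--         text = text.lower()
--     elif case == 'upper':
--         text = text.upper()
--     elif case == 'capitalize':
--         text = text.capitalize()
--     return text
-- ===== SOURCE B (Python) =====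
-- def deslugify(text, delim='_-.', case='title'):
--     ds = frozenset(delim)
--     out = []
--     if case == 'title':
--         prev_alpha = False
--         for c in text:
--             r = ' ' if c in ds else c
--             if r.isalpha():
--                 out.append(r.lower() if prev_alpha else r.upper())
--                 prev_alpha = True
--             else:
--                 out.append(r)
--                 prev_alpha = False
--     elif case == 'lower':
--         for c in text:
--             out.append(' ' if c in ds else c.lower())
--     elif case == 'upper':
--         for c in text:
--             out.append(' ' if c in ds else c.upper())
--     elif case == 'capitalize':
--         first = True
--         for c in text:
--             r = ' ' if c in ds else c
--             out.append(r.upper() if first else r.lower())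
--             first = False
--     else:
--         for c in text:
--             out.append(' ' if c in ds else c)
--     return ''.join(out)
-- ===== Notes on version B (the rewrite author's own statement) =====
-- stated objective: faster
-- what changed: A runs one full-string replace pass per delimiter and then a separate whole-string case pass; B makes a single fused pass over text, replacing delimiters (via a frozenset) and applying the chosen casing character by character with a small state (previous-char-alpha / first-char flag).
import Mathlib
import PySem

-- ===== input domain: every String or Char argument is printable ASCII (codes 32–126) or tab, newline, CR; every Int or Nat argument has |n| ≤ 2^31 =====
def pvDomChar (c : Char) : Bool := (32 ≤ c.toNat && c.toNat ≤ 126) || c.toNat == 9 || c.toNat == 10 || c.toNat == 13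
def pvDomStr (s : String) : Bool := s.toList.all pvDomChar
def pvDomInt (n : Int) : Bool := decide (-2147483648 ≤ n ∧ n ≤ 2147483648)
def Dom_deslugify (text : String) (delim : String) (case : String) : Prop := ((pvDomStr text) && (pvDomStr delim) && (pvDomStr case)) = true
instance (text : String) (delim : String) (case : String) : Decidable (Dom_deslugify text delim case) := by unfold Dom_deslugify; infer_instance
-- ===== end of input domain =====

-- B fuses A's staged passes (one replace pass per delimiter, then a whole-string case pass)
-- into ONE pass over text with a small state; same return value (objective: faster when delim is long).

-- ===== PORT A =====
-- A-side helper: str.title() for ASCII (uppercase a letter after a non-letter, lowercase after a letter);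
-- exact on the printable-ASCII domain, where Python's "cased" = ASCII letter
def pyTitleGo (prev : Bool) : List Char → List Char
  | [] => []
  | c :: t =>
    (if PySem.Chars.isalpha c then
       (if prev then PySem.Chars.lowerChar c else PySem.Chars.upperChar c)
     else c) :: pyTitleGo (PySem.Chars.isalpha c) t

-- A-side helper: str.capitalize() for ASCII (first char upper, rest lower); exact on the ASCII domain
def pyCapitalize : List Char → List Char
  | [] => []
  | c :: t => PySem.Chars.upperChar c :: PySem.Chars.lower t

def deslugify (text : String) (delim : String) (case : String) : String :=
  let replaced := delim.toList.foldl (fun s c => PySem.Str.replace s (String.ofList [c]) " ") text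
  if case = "title" then String.ofList (pyTitleGo false replaced.toList)
  else if case = "lower" then PySem.Str.lower replaced
  else if case = "upper" then PySem.Str.upper replaced
  else if case = "capitalize" then String.ofList (pyCapitalize replaced.toList)
  else replaced

-- ===== PORT B =====
-- B-side helpers: one fused scan per case mode, replacing delimiter chars and casing in the same step
def bTitleLoop (ds : PySem.Set Char) (prevAlpha : Bool) : List Char → List Char
  | [] => []
  | c :: t =>
    let r := if ds.contains c then ' ' else c
    if PySem.Chars.isalpha r then
      (if prevAlpha then PySem.Chars.lowerChar r else PySem.Chars.upperChar r) :: bTitleLoop ds true t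
    else
      r :: bTitleLoop ds false t

def bLowerLoop (ds : PySem.Set Char) : List Char → List Char
  | [] => []
  | c :: t => (if ds.contains c then ' ' else PySem.Chars.lowerChar c) :: bLowerLoop ds t

def bUpperLoop (ds : PySem.Set Char) : List Char → List Char
  | [] => []
  | c :: t => (if ds.contains c then ' ' else PySem.Chars.upperChar c) :: bUpperLoop ds t

def bCapLoop (ds : PySem.Set Char) (first : Bool) : List Char → List Char
  | [] => []
  | c :: t =>
    let r := if ds.contains c then ' ' else c
    (if first then PySem.Chars.upperChar r else PySem.Chars.lowerChar r) :: bCapLoop ds false t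

def bPlainLoop (ds : PySem.Set Char) : List Char → List Char
  | [] => []
  | c :: t => (if ds.contains c then ' ' else c) :: bPlainLoop ds t

def deslugify_alt (text : String) (delim : String) (case : String) : String :=
  let ds : PySem.Set Char := PySem.Set.ofList delim.toList
  String.ofList <|
    if case = "title" then bTitleLoop ds false text.toList
    else if case = "lower" then bLowerLoop ds text.toList
    else if case = "upper" then bUpperLoop ds text.toList
    else if case = "capitalize" then bCapLoop ds true text.toList
    else bPlainLoop ds text.toList

-- ===== PRECONDITION & SPEC =====
def Spec_deslugify (text : String) (delim : String) (case : String) (out : String) : Prop := out = deslugify_alt text delim case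
instance (text : String) (delim : String) (case : String) (out : String) : Decidable (Spec_deslugify text delim case out) := by unfold Spec_deslugify; infer_instance

-- ===== CLAIM (what is proved, stated in full; the proofs are below) =====
def Claim_equal_deslugify : Prop := ∀ (text : String) (delim : String) (case : String), Dom_deslugify text delim case → Spec_deslugify text delim case (deslugify text delim case)

-- ===== LEMMAS AND PROOFS =====

theorem replace_go_single (d : Char) (l acc : List Char) (fuel : Nat) (h : l.length ≤ fuel) :
    PySem.Chars.replace.go [d] [' '] fuel l acc
      = acc.reverse ++ l.map (fun c => if c = d then ' ' else c) := by
  induction l generalizing acc fuel with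
  | nil => cases fuel <;> simp [PySem.Chars.replace.go]
  | cons c t ih =>
    cases fuel with
    | zero => simp at h
    | succ n =>
      simp only [List.length_cons, Nat.succ_le_succ_iff] at h
      by_cases hc : c = d
      · subst hc
        rw [show PySem.Chars.replace.go [c] [' '] (n+1) (c :: t) acc
              = PySem.Chars.replace.go [c] [' '] n t (' ' :: acc) by
            simp [PySem.Chars.replace.go, List.isPrefixOf]]
        rw [ih _ _ h]; simp
      · rw [show PySem.Chars.replace.go [d] [' '] (n+1) (c :: t) acc
              = PySem.Chars.replace.go [d] [' '] n t (c :: acc) by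
            simp [PySem.Chars.replace.go, List.isPrefixOf, Ne.symm hc]]
        rw [ih _ _ h]; simp [hc]

theorem replace_single (d : Char) (l : List Char) :
    PySem.Chars.replace l [d] [' '] = l.map (fun c => if c = d then ' ' else c) := by
  rw [PySem.Chars.replace]
  simp [replace_go_single d l [] l.length (le_refl _)]

theorem foldl_replace_eq_map (ds : List Char) (l : List Char) :
    ds.foldl (fun s c => PySem.Chars.replace s [c] [' ']) l
      = l.map (fun c => if ds.contains c then ' ' else c) := by
  induction ds generalizing l with
  | nil => simp
  | cons d ds ih =>
    simp only [List.foldl_cons]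
    rw [replace_single, ih, List.map_map]
    apply List.map_congr_left
    intro c _
    by_cases hc : c = d
    · subst hc; simp
    · simp [hc]

theorem foldl_str_replace_toList (ds : List Char) (s : String) :
    (ds.foldl (fun s c => PySem.Str.replace s (String.ofList [c]) " ") s).toList
      = ds.foldl (fun l c => PySem.Chars.replace l [c] [' ']) s.toList := by
  induction ds generalizing s with
  | nil => rfl
  | cons d ds ih =>
    simp only [List.foldl_cons]
    rw [ih]
    congr 1
    simp [PySem.Str.replace]

theorem set_contains_ofList (ds : List Char) (c : Char) :
    (PySem.Set.ofList ds).contains c = ds.contains c := by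
  simp only [PySem.Set.contains]
  by_cases h : c ∈ ds
  · simp [h, (PySem.Set.mem_ofList ds c).mpr h]
  · have : c ∉ PySem.Set.ofList ds := fun hm => h ((PySem.Set.mem_ofList ds c).mp hm)
    simp [h, this]

theorem bTitle_eq (ds : List Char) (prev : Bool) (l : List Char) :
    bTitleLoop (PySem.Set.ofList ds) prev l
      = pyTitleGo prev (l.map (fun c => if ds.contains c then ' ' else c)) := by
  induction l generalizing prev with
  | nil => rfl
  | cons c t ih =>
    simp only [List.map_cons, bTitleLoop, pyTitleGo, set_contains_ofList, ih]
    generalize (if ds.contains c = true then ' ' else c) = r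
    cases hA : PySem.Chars.isalpha r <;> simp

theorem bLower_eq (ds : List Char) (l : List Char) :
    bLowerLoop (PySem.Set.ofList ds) l
      = PySem.Chars.lower (l.map (fun c => if ds.contains c then ' ' else c)) := by
  induction l with
  | nil => rfl
  | cons c t ih =>
    simp only [List.map_cons, bLowerLoop, set_contains_ofList, ih, PySem.Chars.lower, List.map_cons]
    by_cases hm : ds.contains c = true
    · rw [if_pos hm, if_pos hm]
      congr 1
    · rw [if_neg hm, if_neg hm]

theorem bUpper_eq (ds : List Char) (l : List Char) :
    bUpperLoop (PySem.Set.ofList ds) l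
      = PySem.Chars.upper (l.map (fun c => if ds.contains c then ' ' else c)) := by
  induction l with
  | nil => rfl
  | cons c t ih =>
    simp only [List.map_cons, bUpperLoop, set_contains_ofList, ih, PySem.Chars.upper, List.map_cons]
    by_cases hm : ds.contains c = true
    · rw [if_pos hm, if_pos hm]
      congr 1
    · rw [if_neg hm, if_neg hm]

theorem bCap_false_eq (ds : List Char) (l : List Char) :
    bCapLoop (PySem.Set.ofList ds) false l
      = PySem.Chars.lower (l.map (fun c => if ds.contains c then ' ' else c)) := by
  induction l with
  | nil => rfl
  | cons c t ih =>
    simp only [List.map_cons, bCapLoop, set_contains_ofList, ih, PySem.Chars.lower]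
    simp

theorem bCap_eq (ds : List Char) (l : List Char) :
    bCapLoop (PySem.Set.ofList ds) true l
      = pyCapitalize (l.map (fun c => if ds.contains c then ' ' else c)) := by
  cases l with
  | nil => rfl
  | cons c t =>
    simp only [List.map_cons, bCapLoop, pyCapitalize, set_contains_ofList, bCap_false_eq]
    simp

theorem bPlain_eq (ds : List Char) (l : List Char) :
    bPlainLoop (PySem.Set.ofList ds) l
      = l.map (fun c => if ds.contains c then ' ' else c) := by
  induction l with
  | nil => rfl
  | cons c t ih => simp only [List.map_cons, bPlainLoop, set_contains_ofList, ih]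

theorem replaced_toList (text delim : String) :
    (delim.toList.foldl (fun s c => PySem.Str.replace s (String.ofList [c]) " ") text).toList
      = text.toList.map (fun c => if delim.toList.contains c then ' ' else c) := by
  rw [foldl_str_replace_toList, foldl_replace_eq_map]

-- ===== VERDICT (by name: the statement is the Claim_ definition above) =====
theorem deslugify_spec : Claim_equal_deslugify := by
  intro text delim case _
  unfold Spec_deslugify deslugify deslugify_alt
  simp only []
  split_ifs with h1 h2 h3 h4
  · rw [bTitle_eq, replaced_toList]
  · apply String.ext
    rw [String.toList_ofList, bLower_eq, PySem.Str.toList_lower, replaced_toList]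
  · apply String.ext
    rw [String.toList_ofList, bUpper_eq, PySem.Str.toList_upper, replaced_toList]
  · rw [bCap_eq, replaced_toList]
  · apply String.ext
    rw [String.toList_ofList, bPlain_eq, ← replaced_toList]
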